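-- pv_equiv track=rewrite | github.com/ChrisDoubleEwe/AdventOfCode2022 | 25.py | s_to_d
-- ===== SOURCE A (Python) =====
-- def s_to_d(n):
--   sum = 0;
--   l = len(n);
--   for i in range(l):
--     col = pow(5, (l-i)-1);
--     if n[i] == '2':
--       sum += 2*col;
--     if n[i] == '1':
--       sum += col;
--     if n[i] == '-':
--       sum -= col;
--     if n[i] == '=':
--       sum -= 2*col;
--   return sum;
-- ===== SOURCE B (Python) =====
-- def s_to_d(n):
--     vals = {'2': 2, '1': 1, '0': 0, '-': -1, '=': -2}
--     total = 0
--     for ch in n: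
--         total = total * 5 + vals.get(ch, 0)
--     return total
-- ===== Notes on version B (the rewrite author's own statement) =====
-- stated objective: faster
-- what changed: Replaced the index/len/pow place-value sum with Horner's method: a single fold over the characters maintaining total = total*5 + digit from one fixed mapping, removing the per-digit pow() and the four separate if-branches.
import Mathlib
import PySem

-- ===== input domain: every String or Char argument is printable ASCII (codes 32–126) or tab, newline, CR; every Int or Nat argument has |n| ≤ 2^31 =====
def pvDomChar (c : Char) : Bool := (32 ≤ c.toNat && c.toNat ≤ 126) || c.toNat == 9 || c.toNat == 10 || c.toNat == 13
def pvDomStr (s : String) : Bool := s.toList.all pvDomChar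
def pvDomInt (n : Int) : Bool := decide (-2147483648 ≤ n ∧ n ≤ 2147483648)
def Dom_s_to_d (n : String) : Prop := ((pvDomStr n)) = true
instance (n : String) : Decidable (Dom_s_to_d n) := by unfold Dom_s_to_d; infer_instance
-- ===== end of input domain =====

-- B replaces A's index/pow place-value sum with Horner's multiply-accumulate over the characters (idiomatic; same behaviour, both total).

-- ===== PORT A =====
def s_to_d (n : String) : Int :=
  let l : Int := PySem.Str.len n
  (PySem.List.pyRange 0 l 1).foldl (fun sum i =>
    let col : Int := 5 ^ ((l - i) - 1).toNat
    let sum := if PySem.Str.pyGet? n i = some '2' then sum + 2 * col else sum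
    let sum := if PySem.Str.pyGet? n i = some '1' then sum + col else sum
    let sum := if PySem.Str.pyGet? n i = some '-' then sum - col else sum
    if PySem.Str.pyGet? n i = some '=' then sum - 2 * col else sum) 0

-- ===== PORT B =====
-- vals.get(ch, 0) from Source B's fixed dict, as a function
def digitVal (c : Char) : Int :=
  if c = '2' then 2 else if c = '1' then 1 else if c = '0' then 0
  else if c = '-' then -1 else if c = '=' then -2 else 0

def s_to_d_alt (n : String) : Int :=
  n.toList.foldl (fun total ch => total * 5 + digitVal ch) 0

-- ===== PRECONDITION & SPEC =====
def Spec_s_to_d (n : String) (out : Int) : Prop := out = s_to_d_alt n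
instance (n : String) (out : Int) : Decidable (Spec_s_to_d n out) := by unfold Spec_s_to_d; infer_instance

-- ===== CLAIM (what is proved, stated in full; the proofs are below) =====
def Claim_equal_s_to_d : Prop := ∀ (n : String), Dom_s_to_d n → Spec_s_to_d n (s_to_d n)

-- ===== LEMMAS AND PROOFS =====

-- digit value of an optional character, matching A's if-chain
def valO (c : Option Char) : Int :=
  if c = some '2' then 2 else if c = some '1' then 1
  else if c = some '-' then -1 else if c = some '=' then -2 else 0

theorem valO_some (c : Char) : valO (some c) = digitVal c := by
  simp only [valO, digitVal, Option.some.injEq]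
  split_ifs <;> simp_all

-- A's chain of four independent ifs is addition of valO c * col
theorem step_eq (s col : Int) (c : Option Char) :
    (let s1 := if c = some '2' then s + 2 * col else s
     let s2 := if c = some '1' then s1 + col else s1
     let s3 := if c = some '-' then s2 - col else s2
     if c = some '=' then s3 - 2 * col else s3) = s + valO c * col := by
  simp only [valO]
  split_ifs <;> simp_all <;> ring

-- the index-and-place-value sum over a list equals Horner's fold
theorem key (cs : List Char) :
    (PySem.List.pyRange 0 (cs.length : Int) 1).foldl
      (fun s i => s + valO (PySem.List.pyGet? cs i) * 5 ^ (((cs.length : Int) - i) - 1).toNat) 0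
    = cs.foldl (fun total ch => total * 5 + digitVal ch) 0 := by
  induction cs using List.reverseRecOn with
  | nil => simp [PySem.List.pyRange_one_eq_nil]
  | append_singleton cs c ih =>
    rw [PySem.List.foldl_add, List.foldl_append]
    rw [PySem.List.foldl_add] at ih
    have hlen : ((cs ++ [c]).length : Int) = (cs.length : Int) + 1 := by
      simp
    rw [hlen, PySem.List.pyRange_one_succ_right (by positivity),
        List.map_append, List.sum_append]
    have hlast : valO (PySem.List.pyGet? (cs ++ [c]) (cs.length : Int))
        * 5 ^ (((cs.length : Int) + 1 - (cs.length : Int)) - 1).toNat = digitVal c := by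
      have : PySem.List.pyGet? (cs ++ [c]) (cs.length : Int) = some c := by
        simp
      rw [this, valO_some]
      norm_num
    have hmap : (PySem.List.pyRange 0 (cs.length : Int) 1).map
        (fun i => valO (PySem.List.pyGet? (cs ++ [c]) i)
          * 5 ^ (((cs.length : Int) + 1 - i) - 1).toNat)
      = (PySem.List.pyRange 0 (cs.length : Int) 1).map
        (fun i => 5 * (valO (PySem.List.pyGet? cs i)
          * 5 ^ (((cs.length : Int) - i) - 1).toNat)) := by
      apply List.map_congr_left
      intro i hi
      rw [PySem.List.mem_pyRange_one] at hi
      have hget : PySem.List.pyGet? (cs ++ [c]) i = PySem.List.pyGet? cs i := by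
        rw [PySem.List.pyGet?_of_nonneg _ hi.1, PySem.List.pyGet?_of_nonneg _ hi.1]
        have hil : i.toNat < cs.length := by omega
        rw [List.getElem?_append_left hil]
      have hexp : (((cs.length : Int) + 1 - i) - 1).toNat
          = (((cs.length : Int) - i) - 1).toNat + 1 := by omega
      rw [hget, hexp, pow_succ]
      ring
    rw [hmap, List.sum_map_mul_left]
    simp only [List.map_cons, List.map_nil, List.sum_cons, List.sum_nil, add_zero,
      List.foldl_cons, List.foldl_nil]
    rw [hlast, ← ih]
    ring

-- the fold in A's port uses exactly the step function of `key`
theorem s_to_d_eq_sum (n : String) :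
    s_to_d n = (PySem.List.pyRange 0 ((n.toList.length : Int)) 1).foldl
      (fun s i => s + valO (PySem.List.pyGet? n.toList i)
        * 5 ^ (((n.toList.length : Int) - i) - 1).toNat) 0 := by
  have hfun : (fun (sum i : Int) =>
      if PySem.Str.pyGet? n i = some '=' then
        (if PySem.Str.pyGet? n i = some '-' then
          (if PySem.Str.pyGet? n i = some '1' then
            (if PySem.Str.pyGet? n i = some '2' then sum + 2 * 5 ^ (((n.toList.length : Int) - i) - 1).toNat else sum)
              + 5 ^ (((n.toList.length : Int) - i) - 1).toNat
           else if PySem.Str.pyGet? n i = some '2' then sum + 2 * 5 ^ (((n.toList.length : Int) - i) - 1).toNat else sum)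
            - 5 ^ (((n.toList.length : Int) - i) - 1).toNat
         else if PySem.Str.pyGet? n i = some '1' then
            (if PySem.Str.pyGet? n i = some '2' then sum + 2 * 5 ^ (((n.toList.length : Int) - i) - 1).toNat else sum)
              + 5 ^ (((n.toList.length : Int) - i) - 1).toNat
           else if PySem.Str.pyGet? n i = some '2' then sum + 2 * 5 ^ (((n.toList.length : Int) - i) - 1).toNat else sum)
          - 2 * 5 ^ (((n.toList.length : Int) - i) - 1).toNat
      else if PySem.Str.pyGet? n i = some '-' then
          (if PySem.Str.pyGet? n i = some '1' then
            (if PySem.Str.pyGet? n i = some '2' then sum + 2 * 5 ^ (((n.toList.length : Int) - i) - 1).toNat else sum)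
              + 5 ^ (((n.toList.length : Int) - i) - 1).toNat
           else if PySem.Str.pyGet? n i = some '2' then sum + 2 * 5 ^ (((n.toList.length : Int) - i) - 1).toNat else sum)
            - 5 ^ (((n.toList.length : Int) - i) - 1).toNat
       else if PySem.Str.pyGet? n i = some '1' then
            (if PySem.Str.pyGet? n i = some '2' then sum + 2 * 5 ^ (((n.toList.length : Int) - i) - 1).toNat else sum)
              + 5 ^ (((n.toList.length : Int) - i) - 1).toNat
        else if PySem.Str.pyGet? n i = some '2' then sum + 2 * 5 ^ (((n.toList.length : Int) - i) - 1).toNat else sum)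
    = (fun s i => s + valO (PySem.List.pyGet? n.toList i)
        * 5 ^ (((n.toList.length : Int) - i) - 1).toNat) := by
    funext s i
    have hg : PySem.Str.pyGet? n i = PySem.List.pyGet? n.toList i := by
      simp [PySem.Str.pyGet?, PySem.List.pyGet?]
    simp only [hg]
    exact step_eq s (5 ^ (((n.toList.length : Int) - i) - 1).toNat) (PySem.List.pyGet? n.toList i)
  simp only [s_to_d, PySem.Str.len_eq]
  rw [hfun]

-- ===== VERDICT (by name: the statement is the Claim_ definition above) =====
theorem s_to_d_spec : Claim_equal_s_to_d := by
  intro n _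
  unfold Spec_s_to_d s_to_d_alt
  rw [s_to_d_eq_sum, key]
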